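-- pv_equiv track=rewrite | github.com/inanitionnn/python-labs | lab3.py | check
-- ===== SOURCE A (Python) =====
-- def check(k):
--     """
--     checks if there are 2 in the
--     ternary notation of a number
--     """
--     if k < 0:
--         k = -k
--     has_2 = False
--     while k > 0 and not has_2:
--         has_2 = (k%3)%2 == 0
--         k //= 3
--     return has_2
-- ===== SOURCE B (Python) =====
-- def check(k):
--     # A number has an even ternary digit (0 or 2) iff it is NOT a base-3
--     # repunit 11...1 = (3**n - 1)/2, i.e. iff 2*|k|+1 is not a power of 3.
--     m = 2 * abs(k) + 1
--     while m % 3 == 0: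
--         m //= 3
--     return m != 1
-- ===== Notes on version B (the rewrite author's own statement) =====
-- stated objective: alternative
-- what changed: Replaces A's ternary-digit extraction loop with a number-theoretic test: the digits of |k| are all odd (all equal 1) iff |k| is a base-3 repunit, i.e. iff 2*|k|+1 is a power of 3, tested by stripping factors of 3 from 2*|k|+1 and comparing the residue with 1.
import Mathlib
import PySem

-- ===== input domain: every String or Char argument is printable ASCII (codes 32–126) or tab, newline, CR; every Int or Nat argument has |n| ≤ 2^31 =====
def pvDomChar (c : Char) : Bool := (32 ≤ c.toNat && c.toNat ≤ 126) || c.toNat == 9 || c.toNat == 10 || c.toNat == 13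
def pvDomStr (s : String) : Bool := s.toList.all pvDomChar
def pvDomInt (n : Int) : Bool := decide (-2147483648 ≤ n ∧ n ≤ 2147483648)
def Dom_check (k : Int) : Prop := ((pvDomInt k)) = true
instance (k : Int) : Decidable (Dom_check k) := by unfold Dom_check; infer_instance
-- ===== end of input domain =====

-- B replaces digit extraction by a number-theoretic test: |k| has only odd ternary digits iff 2*|k|+1 is a power of 3 (objective: alternative algorithm, same cost).

-- ===== PORT A =====
-- the while loop: state (k, has_2); body sets has_2 then k //= 3
def checkLoop (k : Int) (has2 : Bool) : Bool :=
  if k > 0 ∧ has2 = false then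
    checkLoop (PySem.Int.floordiv k 3) (PySem.Int.mod (PySem.Int.mod k 3) 2 == 0)
  else has2
termination_by k.toNat
decreasing_by
  have h3 : (0:Int) < 3 := by norm_num
  rw [PySem.Int.floordiv_eq_ediv_of_pos h3]
  omega

def check (k : Int) : Bool :=
  checkLoop (if k < 0 then -k else k) false

-- ===== PORT B =====
-- while m % 3 == 0: m //= 3   (the 'm > 0' conjunct only makes the recursion total in Lean;
-- B always calls strip3 on m = 2*|k|+1 ≥ 1, where it never changes the course of the loop)
def strip3 (m : Int) : Int :=
  if PySem.Int.mod m 3 == 0 ∧ m > 0 then strip3 (PySem.Int.floordiv m 3) else m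
termination_by m.toNat
decreasing_by
  have h3 : (0:Int) < 3 := by norm_num
  rw [PySem.Int.floordiv_eq_ediv_of_pos h3]
  omega

def check_alt (k : Int) : Bool :=
  strip3 (2 * |k| + 1) != 1

-- ===== PRECONDITION & SPEC =====
def Spec_check (k : Int) (out : Bool) : Prop := out = check_alt k
instance (k : Int) (out : Bool) : Decidable (Spec_check k out) := by unfold Spec_check; infer_instance

-- ===== CLAIM (what is proved, stated in full; the proofs are below) =====
def Claim_equal_check : Prop := ∀ (k : Int), Dom_check k → Spec_check k (check k)

-- ===== LEMMAS AND PROOFS =====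
theorem checkLoop_true (k : Int) : checkLoop k true = true := by
  rw [checkLoop]; simp

theorem strip3_mul3 (m : Int) (hm : 0 < m) : strip3 (3 * m) = strip3 m := by
  conv_lhs => rw [strip3]
  have hdiv : PySem.Int.floordiv (3 * m) 3 = m := by
    rw [PySem.Int.floordiv_eq_ediv_of_pos (by norm_num : (0:Int) < 3)]
    omega
  rw [if_pos ⟨by simp, by omega⟩, hdiv]

-- core invariant: for n ≥ 0, A's loop from (n, false) agrees with B's power-of-3 test on 2n+1
theorem main_eq : ∀ (N : Nat) (n : Int), 0 ≤ n → n.toNat ≤ N →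
    checkLoop n false = (strip3 (2 * n + 1) != 1) := by
  intro N
  induction N with
  | zero =>
      intro n hn hN
      have hn0 : n = 0 := by omega
      subst hn0
      rw [checkLoop]
      rw [strip3]
      norm_num [PySem.Int.mod_eq_emod_of_pos]
  | succ N ih =>
      intro n hn hN
      by_cases hpos : n > 0
      · have h3 : (0:Int) < 3 := by norm_num
        have hmod : PySem.Int.mod n 3 = n % 3 := PySem.Int.mod_eq_emod_of_pos h3
        have hdiv : PySem.Int.floordiv n 3 = n / 3 := PySem.Int.floordiv_eq_ediv_of_pos h3
        rw [checkLoop]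
        simp only [hpos, true_and, hmod, hdiv]
        set q := n / 3 with hq
        have hr : n % 3 = 0 ∨ n % 3 = 1 ∨ n % 3 = 2 := by omega
        have hqn : n = 3 * q + n % 3 := by omega
        have hq0 : 0 ≤ q := by positivity
        rcases hr with hr | hr | hr
        · -- digit 0: has_2 becomes true; 2n+1 = 6q+1 ≡ 1 (mod 3), q ≥ 1 so 6q+1 ≠ 1
          rw [hr]
          simp only [if_true, show (PySem.Int.mod (0:Int) 2 == 0) = true from by decide,
            checkLoop_true]
          have hq1 : 1 ≤ q := by omega
          rw [strip3]
          have h2n : (2 * n + 1) % 3 = 1 := by omega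
          simp only [PySem.Int.mod_eq_emod_of_pos (by norm_num : (0:Int) < 3), h2n]
          norm_num
          omega
        · -- digit 1: has_2 stays false; 2n+1 = 3*(2q+1)
          rw [hr]
          simp only [if_true, show (PySem.Int.mod (1:Int) 2 == 0) = false from by decide]
          rw [ih q hq0 (by omega)]
          -- strip3 (2n+1) = strip3 (2q+1) since 2n+1 = 3*(2q+1)
          have hmul : 2 * n + 1 = 3 * (2 * q + 1) := by omega
          rw [hmul, strip3_mul3 _ (by omega)]
        · -- digit 2: has_2 becomes true; 2n+1 = 6q+5 ≡ 2 (mod 3), ≠ 1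
          rw [hr]
          simp only [if_true, show (PySem.Int.mod (2:Int) 2 == 0) = true from by decide,
            checkLoop_true]
          rw [strip3]
          have h2n : (2 * n + 1) % 3 = 2 := by omega
          simp only [PySem.Int.mod_eq_emod_of_pos (by norm_num : (0:Int) < 3), h2n]
          norm_num
          omega
      · have hn0 : n = 0 := by omega
        subst hn0
        rw [checkLoop, strip3]
        norm_num [PySem.Int.mod_eq_emod_of_pos]

-- ===== VERDICT (by name: the statement is the Claim_ definition above) =====
theorem check_spec : Claim_equal_check := by
  intro k _
  unfold Spec_check check check_alt
  have habs : (if k < 0 then -k else k) = |k| := by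
    rcases lt_or_ge k 0 with h | h
    · simp [h, abs_of_neg h]
    · simp [not_lt.mpr h, abs_of_nonneg h]
  rw [habs, main_eq |k|.toNat |k| (abs_nonneg k) le_rfl]
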